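-- pv_equiv track=rewrite | github.com/ERMIN372/karavaevi_bk | main.py | _capitalize_position_text
-- ===== SOURCE A (Python) =====
-- def _capitalize_position_text(value: str) -> str:
--     words = []
--     for word in value.split(" "):
--         parts = []
--         for part in word.split("-"):
--             if not part:
--                 parts.append(part)
--             else:
--                 parts.append(part[0].upper() + part[1:].lower())
--         words.append("-".join(parts))
--     return " ".join(words)
-- ===== SOURCE B (Python) =====
-- def _capitalize_position_text(value: str) -> str:
--     out = []
--     start = True
--     for c in value:
--         if c == ' ' or c == '-':
--             out.append(c)
--             start = True
--         else:
--             out.append(c.upper() if start else c.lower())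
--             start = False
--     return "".join(out)
-- ===== Notes on version B (the rewrite author's own statement) =====
-- stated objective: simpler
-- what changed: Replaced the nested split-on-space/split-on-hyphen/join passes with a single left-to-right pass over the characters keeping a boolean word-start flag.
import Mathlib
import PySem

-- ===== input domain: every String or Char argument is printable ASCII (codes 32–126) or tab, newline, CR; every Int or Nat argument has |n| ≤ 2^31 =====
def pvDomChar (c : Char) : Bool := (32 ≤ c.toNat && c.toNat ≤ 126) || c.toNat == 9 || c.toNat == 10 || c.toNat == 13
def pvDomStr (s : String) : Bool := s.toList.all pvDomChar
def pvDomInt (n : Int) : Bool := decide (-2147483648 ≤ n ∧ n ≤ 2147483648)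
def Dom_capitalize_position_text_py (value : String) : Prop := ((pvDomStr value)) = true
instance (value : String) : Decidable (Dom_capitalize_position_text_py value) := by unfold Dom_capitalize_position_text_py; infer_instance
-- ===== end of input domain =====

-- B replaces A's nested split/join passes with one left-to-right pass keeping a word-start flag (simpler).

-- ===== PORT A =====
-- 'if not part: part; else part[0].upper() + part[1:].lower()' (part[0] = c, part[1:] = rest)
def capPartA (part : List Char) : List Char :=
  match part with
  | [] => part
  | c :: rest => PySem.Chars.upper [c] ++ PySem.Chars.lower rest

def capitalize_position_text_py (value : String) : String :=
  String.ofList (PySem.Chars.join [' ']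
    ((PySem.Chars.splitOn value.toList [' ']).map (fun word =>
      PySem.Chars.join ['-'] ((PySem.Chars.splitOn word ['-']).map capPartA))))

-- ===== PORT B =====
def capitalize_position_text_py_alt (value : String) : String :=
  String.ofList
    (value.toList.foldl
      (fun (acc : List Char × Bool) c =>
        if c = ' ' ∨ c = '-' then (acc.1 ++ [c], true)
        else (acc.1 ++ [if acc.2 then PySem.Chars.upperChar c else PySem.Chars.lowerChar c], false))
      ([], true)).1

-- ===== PRECONDITION & SPEC =====
def Spec_capitalize_position_text_py (value : String) (out : String) : Prop := out = capitalize_position_text_py_alt value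
instance (value : String) (out : String) : Decidable (Spec_capitalize_position_text_py value out) := by unfold Spec_capitalize_position_text_py; infer_instance

-- ===== CLAIM (what is proved, stated in full; the proofs are below) =====
def Claim_equal_capitalize_position_text_py : Prop := ∀ (value : String), Dom_capitalize_position_text_py value → Spec_capitalize_position_text_py value (capitalize_position_text_py value)

-- ===== LEMMAS AND PROOFS =====

-- simple structural version of splitting on a single character (keeps empty pieces)
def splitList (d : Char) : List Char → List (List Char)
  | [] => [[]]
  | c :: t => if c = d then [] :: splitList d t else (splitList d t).modifyHead (c :: ·)

-- single pass with flag, '-' as the only delimiter (inner layer of A)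
def spec1 : List Char → Bool → List Char
  | [], _ => []
  | c :: t, b =>
    if c = '-' then c :: spec1 t true
    else (if b then PySem.Chars.upperChar c else PySem.Chars.lowerChar c) :: spec1 t false

-- single pass with flag, both delimiters (what B computes)
def spec2 : List Char → Bool → List Char
  | [], _ => []
  | c :: t, b =>
    if c = ' ' ∨ c = '-' then c :: spec2 t true
    else (if b then PySem.Chars.upperChar c else PySem.Chars.lowerChar c) :: spec2 t false

theorem splitList_cons_eq (d : Char) (t : List Char) :
    splitList d (d :: t) = [] :: splitList d t := by simp [splitList]

theorem splitList_cons_ne {c d : Char} (hc : c ≠ d) (t : List Char) :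
    splitList d (c :: t) = (splitList d t).modifyHead (c :: ·) := by simp [splitList, hc]

theorem splitList_shape (d : Char) (l : List Char) : ∃ p ps, splitList d l = p :: ps := by
  induction l with
  | nil => exact ⟨[], [], rfl⟩
  | cons c t ih =>
    obtain ⟨p, ps, h⟩ := ih
    by_cases hc : c = d
    · exact ⟨[], splitList d t, by simp [splitList, hc]⟩
    · exact ⟨c :: p, ps, by simp [splitList, hc, h]⟩

theorem splitOn_go_single (d : Char) :
    ∀ (fuel : Nat) (l cur : List Char) (accl : List (List Char)), l.length < fuel →
      PySem.Chars.splitOn.go [d] fuel l cur accl =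
        accl.reverse ++ (splitList d l).modifyHead (cur.reverse ++ ·) := by
  intro fuel
  induction fuel with
  | zero => intro l cur accl h; omega
  | succ n ih =>
    intro l cur accl h
    cases l with
    | nil =>
      rw [PySem.Chars.splitOn.go]
      · simp [splitList]
      · omega
    | cons c rest =>
      rw [PySem.Chars.splitOn.go]
      by_cases hc : c = d
      · have hpre : List.isPrefixOf [d] (c :: rest) = true := by simp [List.isPrefixOf, hc]
        rw [if_pos hpre]
        simp only [List.length_singleton, List.drop_succ_cons, List.drop_zero]
        rw [ih rest [] (cur.reverse :: accl) (by simp at h; omega)]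
        obtain ⟨p, ps, hs⟩ := splitList_shape d rest
        simp [splitList, hc, hs]
      · have hpre : List.isPrefixOf [d] (c :: rest) = false := by
          simp [List.isPrefixOf]; exact fun hh => (hc hh.symm).elim
        rw [if_neg (by simp [hpre])]
        rw [ih rest (c :: cur) accl (by simp at h; omega)]
        obtain ⟨p, ps, hs⟩ := splitList_shape d rest
        simp [splitList, hc, hs]

theorem splitOn_single (l : List Char) (d : Char) :
    PySem.Chars.splitOn l [d] = splitList d l := by
  rw [PySem.Chars.splitOn, splitOn_go_single d (l.length + 1) l [] [] (by omega)]
  obtain ⟨p, ps, hs⟩ := splitList_shape d l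
  simp [hs]

theorem join_prepend (s x y : List Char) (ps : List (List Char)) :
    PySem.Chars.join s ((x ++ y) :: ps) = x ++ PySem.Chars.join s (y :: ps) := by
  cases ps with
  | nil => simp [PySem.Chars.join_singleton]
  | cons z zs => simp [PySem.Chars.join_cons_cons]

-- head processed with flag b (lowered entirely when b = false), rest with capPartA
def capHead (b : Bool) : List (List Char) → List (List Char)
  | [] => []
  | p :: ps => (if b then capPartA p else PySem.Chars.lower p) :: ps.map capPartA

theorem capHead_true (xs : List (List Char)) : capHead true xs = xs.map capPartA := by
  cases xs <;> simp [capHead]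

theorem innerGen (l : List Char) : ∀ b,
    PySem.Chars.join ['-'] (capHead b (splitList '-' l)) = spec1 l b := by
  induction l with
  | nil =>
    intro b
    cases b <;> simp [splitList, capHead, capPartA, PySem.Chars.lower,
      PySem.Chars.join_singleton, spec1]
  | cons c t ih =>
    intro b
    by_cases hc : c = '-'
    · obtain ⟨p, ps, hs⟩ := splitList_shape '-' t
      subst hc
      rw [splitList_cons_eq, hs]
      simp only [capHead, List.map_cons]
      have h0 : (if b = true then capPartA [] else PySem.Chars.lower []) = ([] : List Char) := by
        cases b <;> rfl
      rw [h0, PySem.Chars.join_cons_cons]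
      have : capPartA p :: ps.map capPartA = capHead true (p :: ps) := by
        simp [capHead]
      simp only [this, ← hs, ih true]
      simp [spec1]
    · obtain ⟨p, ps, hs⟩ := splitList_shape '-' t
      rw [splitList_cons_ne hc, hs]
      simp only [List.modifyHead_cons, capHead]
      have hhead : (if b then capPartA (c :: p) else PySem.Chars.lower (c :: p)) =
          [if b then PySem.Chars.upperChar c else PySem.Chars.lowerChar c] ++ PySem.Chars.lower p := by
        cases b <;> simp [capPartA, PySem.Chars.lower, PySem.Chars.upper]
      rw [hhead, join_prepend]
      have : PySem.Chars.lower p :: ps.map capPartA = capHead false (p :: ps) := by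
        simp [capHead]
      rw [this, ← hs, ih false]
      simp [spec1, hc]

def gInner (w : List Char) : List Char :=
  PySem.Chars.join ['-'] ((splitList '-' w).map capPartA)

def capWHead (b : Bool) : List (List Char) → List (List Char)
  | [] => []
  | w :: ws => PySem.Chars.join ['-'] (capHead b (splitList '-' w)) :: ws.map gInner

theorem capWHead_true (xs : List (List Char)) : capWHead true xs = xs.map gInner := by
  cases xs <;> simp [capWHead, gInner, capHead_true]

theorem outerGen (l : List Char) : ∀ b,
    PySem.Chars.join [' '] (capWHead b (splitList ' ' l)) = spec2 l b := by
  induction l with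
  | nil =>
    intro b
    cases b <;> simp [splitList, capWHead, capHead, capPartA, PySem.Chars.lower,
      PySem.Chars.join_singleton, spec2]
  | cons c t ih =>
    intro b
    by_cases hc : c = ' '
    · obtain ⟨w, ws, hs⟩ := splitList_shape ' ' t
      subst hc
      rw [splitList_cons_eq, hs]
      simp only [capWHead, List.map_cons]
      have hempty : PySem.Chars.join ['-'] (capHead b (splitList '-' [])) = [] := by
        cases b <;> simp [splitList, capHead, capPartA, PySem.Chars.lower,
          PySem.Chars.join_singleton]
      rw [hempty, PySem.Chars.join_cons_cons]
      have : gInner w :: ws.map gInner = capWHead true (w :: ws) := by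
        simp [capWHead, gInner, capHead_true]
      simp only [this, ← hs, ih true]
      simp [spec2]
    · obtain ⟨w, ws, hs⟩ := splitList_shape ' ' t
      rw [splitList_cons_ne hc, hs]
      simp only [List.modifyHead_cons, capWHead]
      rw [innerGen (c :: w) b]
      by_cases hd : c = '-'
      · have hsp : spec1 (c :: w) b = [c] ++ spec1 w true := by simp [spec1, hd]
        rw [hsp, join_prepend, ← innerGen w true]
        have : PySem.Chars.join ['-'] (capHead true (splitList '-' w)) :: ws.map gInner =
            capWHead true (w :: ws) := by simp [capWHead]
        rw [this, ← hs, ih true]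
        simp [spec2, hd]
      · have hsp : spec1 (c :: w) b =
            [if b then PySem.Chars.upperChar c else PySem.Chars.lowerChar c] ++ spec1 w false := by
          simp [spec1, hd]
        rw [hsp, join_prepend, ← innerGen w false]
        have : PySem.Chars.join ['-'] (capHead false (splitList '-' w)) :: ws.map gInner =
            capWHead false (w :: ws) := by simp [capWHead]
        rw [this, ← hs, ih false]
        simp [spec2, hc, hd]

theorem foldlB (l : List Char) : ∀ (acc : List Char) (b : Bool),
    (l.foldl
      (fun (acc : List Char × Bool) c =>
        if c = ' ' ∨ c = '-' then (acc.1 ++ [c], true)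
        else (acc.1 ++ [if acc.2 then PySem.Chars.upperChar c else PySem.Chars.lowerChar c], false))
      (acc, b)).1 = acc ++ spec2 l b := by
  induction l with
  | nil => intro acc b; simp [spec2]
  | cons c t ih =>
    intro acc b
    by_cases h : c = ' ' ∨ c = '-' <;> simp [List.foldl, h, spec2, ih]

-- ===== VERDICT (by name: the statement is the Claim_ definition above) =====
theorem capitalize_position_text_py_spec : Claim_equal_capitalize_position_text_py := by
  intro value _
  unfold Spec_capitalize_position_text_py capitalize_position_text_py capitalize_position_text_py_alt
  rw [foldlB]
  congr 1
  simp only [splitOn_single]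
  rw [show ((splitList ' ' value.toList).map (fun word =>
      PySem.Chars.join ['-'] ((splitList '-' word).map capPartA))) =
      (splitList ' ' value.toList).map gInner from rfl]
  rw [← capWHead_true, outerGen]
  simp
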